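-- pv_equiv track=rewrite | github.com/sshpiz/french_conjugato | generate_core_patterns.py | merge_entry
-- ===== SOURCE A (Python) =====
-- def merge_entry(existing_entries: list[dict], new_entry: dict, overwrite: bool) -> list[dict]:
--     by_verb = {entry["verb"]: entry for entry in existing_entries}
--     if overwrite or new_entry["verb"] not in by_verb:
--         by_verb[new_entry["verb"]] = new_entry
--
--     ordered_verbs = []
--     seen = set()
--     for entry in existing_entries:
--         verb = entry["verb"]
--         if verb not in seen:
--             ordered_verbs.append(verb)
--             seen.add(verb)
--     if new_entry["verb"] not in seen:
--         ordered_verbs.append(new_entry["verb"])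
--
--     return [by_verb[verb] for verb in ordered_verbs if verb in by_verb]
-- ===== SOURCE B (Python) =====
-- def merge_entry(existing_entries: list[dict], new_entry: dict, overwrite: bool) -> list[dict]:
--     entries = list(existing_entries)
--     if overwrite or all(e["verb"] != new_entry["verb"] for e in entries):
--         entries.append(new_entry)
--     return _collapse(entries)
--
--
-- def _collapse(entries: list[dict]) -> list[dict]:
--     # keep each verb at its first position, carrying the last entry seen for it
--     if not entries:
--         return []
--     v = entries[0]["verb"]
--     same = [e for e in entries if e["verb"] == v]
--     rest = [e for e in entries[1:] if e["verb"] != v]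
--     return [same[-1]] + _collapse(rest)
-- ===== Notes on version B (the rewrite author's own statement) =====
-- stated objective: alternative
-- what changed: B drops A's dict/seen-set/ordered-list bookkeeping entirely: it conditionally appends the new entry and then recursively collapses the list with filters, keeping each verb's first position with its last entry (O(n^2) scans instead of hashing).
import Mathlib
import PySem

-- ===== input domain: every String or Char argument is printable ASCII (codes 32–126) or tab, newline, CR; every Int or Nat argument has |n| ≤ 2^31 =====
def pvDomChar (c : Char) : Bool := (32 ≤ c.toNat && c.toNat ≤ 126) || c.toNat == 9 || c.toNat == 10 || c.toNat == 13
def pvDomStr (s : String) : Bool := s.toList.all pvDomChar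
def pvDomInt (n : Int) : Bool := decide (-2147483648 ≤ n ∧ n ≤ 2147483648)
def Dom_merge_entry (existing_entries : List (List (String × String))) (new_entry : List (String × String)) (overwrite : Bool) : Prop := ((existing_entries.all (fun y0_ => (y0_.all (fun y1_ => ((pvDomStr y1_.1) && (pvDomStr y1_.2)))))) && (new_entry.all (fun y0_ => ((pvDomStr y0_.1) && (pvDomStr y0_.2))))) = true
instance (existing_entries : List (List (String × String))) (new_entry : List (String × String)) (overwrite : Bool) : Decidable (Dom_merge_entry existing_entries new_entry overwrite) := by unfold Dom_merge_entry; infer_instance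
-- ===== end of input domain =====

-- B drops A's dict/seen-set/ordered-list bookkeeping: it conditionally appends the new entry and
-- recursively collapses the list with filters, keeping each verb's first position with its last
-- entry (objective: alternative decomposition, no claim of speed).

-- ===== PORT A =====
-- entry["verb"]: first match in the association list; Pre_ guarantees the key is present,
-- so the .getD "" default is never reached on admitted inputs.
def pvVerbA (e : List (String × String)) : String :=
  ((PySem.Dict.mk e).get? "verb").getD ""

def merge_entry (existing_entries : List (List (String × String))) (new_entry : List (String × String)) (overwrite : Bool) : List (List (String × String)) :=
  let by_verb0 : PySem.Dict String (List (String × String)) :=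
    existing_entries.foldl (fun d e => d.insert (pvVerbA e) e) PySem.Dict.empty
  let nv := pvVerbA new_entry
  let by_verb := if overwrite || !(by_verb0.contains nv) then by_verb0.insert nv new_entry else by_verb0
  let os : List String × PySem.Set String :=
    existing_entries.foldl (fun p e =>
      let v := pvVerbA e
      if PySem.Set.contains p.2 v then p else (p.1 ++ [v], PySem.Set.add p.2 v)) ([], [])
  let ordered := if PySem.Set.contains os.2 nv then os.1 else os.1 ++ [nv]
  (ordered.filter (fun v => by_verb.contains v)).map (fun v => by_verb.getD v [])

-- ===== PORT B =====
-- _collapse from Source B: first element's verb keeps the first position with the LAST entry of that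
-- verb (same[-1], ported with pyGetD at index -1); recurse on the rest with that verb filtered out.
def pvCollapse : List (List (String × String)) → List (List (String × String))
  | [] => []
  | e :: rest =>
    let v := pvVerbA e
    let same := (e :: rest).filter (fun x => pvVerbA x == v)
    let rest' := rest.filter (fun x => pvVerbA x != v)
    PySem.List.pyGetD same (-1) [] :: pvCollapse rest'
termination_by l => l.length
decreasing_by simpa using Nat.lt_succ_of_le (List.length_filter_le _ rest)

def merge_entry_alt (existing_entries : List (List (String × String))) (new_entry : List (String × String)) (overwrite : Bool) : List (List (String × String)) :=
  let entries := existing_entries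
  let entries :=
    if overwrite || entries.all (fun e => pvVerbA e != pvVerbA new_entry) then
      entries ++ [new_entry]
    else entries
  pvCollapse entries

-- ===== PRECONDITION & SPEC =====
-- Pre_ excludes exactly the inputs where the Python raises KeyError: an entry (or new_entry)
-- without the key "verb".
def Pre_merge_entry (existing_entries : List (List (String × String))) (new_entry : List (String × String)) (overwrite : Bool) : Prop :=
  (∀ e ∈ existing_entries, "verb" ∈ e.map Prod.fst) ∧ "verb" ∈ new_entry.map Prod.fst
instance (existing_entries : List (List (String × String))) (new_entry : List (String × String)) (overwrite : Bool) : Decidable (Pre_merge_entry existing_entries new_entry overwrite) := by unfold Pre_merge_entry; infer_instance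

def pvWitness_merge_entry : (List (List (String × String))) × (List (String × String)) × Bool :=
  ([[("verb", "aller"), ("group", "3")]], [("verb", "parler")], false)

def Spec_merge_entry (existing_entries : List (List (String × String))) (new_entry : List (String × String)) (overwrite : Bool) (out : List (List (String × String))) : Prop := out = merge_entry_alt existing_entries new_entry overwrite
instance (existing_entries : List (List (String × String))) (new_entry : List (String × String)) (overwrite : Bool) (out : List (List (String × String))) : Decidable (Spec_merge_entry existing_entries new_entry overwrite out) := by unfold Spec_merge_entry; infer_instance

-- ===== CLAIM (what is proved, stated in full; the proofs are below) =====
def Claim_equal_merge_entry : Prop := ∀ (existing_entries : List (List (String × String))) (new_entry : List (String × String)) (overwrite : Bool), Dom_merge_entry existing_entries new_entry overwrite → Pre_merge_entry existing_entries new_entry overwrite → Spec_merge_entry existing_entries new_entry overwrite (merge_entry existing_entries new_entry overwrite)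

-- ===== LEMMAS AND PROOFS =====

-- the dict both sides revolve around
def pvD (l : List (List (String × String))) : PySem.Dict String (List (String × String)) :=
  l.foldl (fun d e => d.insert (pvVerbA e) e) PySem.Dict.empty

-- the common normal form: first-occurrence verbs, each mapped to the last entry with that verb
def pvSpecList (l : List (List (String × String))) : List (List (String × String)) :=
  (PySem.List.dedup (l.map pvVerbA)).map
    (fun k => ((l.filter (fun x => pvVerbA x == k)).getLast?).getD [])

lemma pyGetD_neg_one {α : Type} [Inhabited α] (x : α) (xs : List α) (d : α) :
    PySem.List.pyGetD (x :: xs) (-1) d = (x :: xs).getLast?.getD d := by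
  simp [PySem.List.pyGetD, PySem.List.pyGet?, PySem.List.pyIdx?]
  rw [List.getLast?_eq_getLast (by simp), Option.getD_some]
  exact List.getElem_cons_length rfl

lemma map_filter_comm {α β : Type} (f : α → β) (p : β → Bool) (l : List α) :
    (l.filter (fun x => p (f x))).map f = (l.map f).filter p := by
  induction l with
  | nil => rfl
  | cons a l ih => by_cases h : p (f a) <;> simp [h, ih]

lemma getD_fold_last (l : List (List (String × String)))
    (d : PySem.Dict String (List (String × String))) (k : String) :
    (l.foldl (fun d e => d.insert (pvVerbA e) e) d).getD k []
      = ((l.filter (fun x => pvVerbA x == k)).getLast?).getD (d.getD k []) := by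
  induction l generalizing d with
  | nil => rfl
  | cons e l ih =>
    simp only [List.foldl_cons, List.filter_cons]
    rw [ih]
    by_cases he : pvVerbA e = k
    · simp only [he, beq_self_eq_true, if_pos]
      rw [PySem.Dict.getD_insert, if_pos rfl, List.getLast?_cons]
      cases (l.filter (fun x => pvVerbA x == k)).getLast? <;> rfl
    · rw [if_neg (by simp [he]), PySem.Dict.getD_insert, if_neg (Ne.symm he)]

lemma keys_pvD (l : List (List (String × String))) :
    (pvD l).keys = PySem.List.dedup (l.map pvVerbA) := by
  rw [pvD, PySem.Dict.keys_foldl_insert_key, PySem.Dict.keys_empty,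
      PySem.List.dedup_eq_ofList, PySem.Set.ofList_eq_foldl]
  rfl

lemma values_fold (l : List (List (String × String))) : (pvD l).values = pvSpecList l := by
  have hnd : (pvD l).keys.Nodup :=
    PySem.Dict.nodup_keys_foldl_insert_key _ _ _ _ PySem.Dict.nodup_keys_empty
  rw [PySem.Dict.values_eq_map_keys (pvD l) hnd [], keys_pvD, pvSpecList]
  refine List.map_congr_left (fun k _ => ?_)
  rw [pvD, getD_fold_last, PySem.Dict.getD_empty]

lemma add_cons_of_ne (s : PySem.Set String) (v y : String) (h : y ≠ v) :
    PySem.Set.add (v :: s) y = v :: PySem.Set.add s y := by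
  by_cases hm : y ∈ s
  · rw [PySem.Set.add_of_mem hm, PySem.Set.add_of_mem (List.mem_cons_of_mem _ hm)]
  · rw [PySem.Set.add_of_not_mem hm, PySem.Set.add_of_not_mem (by
      intro hmem
      rcases List.mem_cons.mp hmem with h1 | h1
      · exact h h1
      · exact hm h1)]
    rfl

lemma foldl_add_cons (xs : List String) (s : PySem.Set String) (v : String)
    (h : ∀ y ∈ xs, y ≠ v) :
    xs.foldl PySem.Set.add (v :: s) = v :: xs.foldl PySem.Set.add s := by
  induction xs generalizing s with
  | nil => rfl
  | cons y xs ih =>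
    simp only [List.foldl_cons]
    rw [add_cons_of_ne s v y (h y (by simp))]
    exact ih _ (fun z hz => h z (by simp [hz]))

lemma foldl_add_filter_mem (xs : List String) (s : PySem.Set String) (v : String) (h : v ∈ s) :
    xs.foldl PySem.Set.add s = (xs.filter (fun x => x != v)).foldl PySem.Set.add s := by
  induction xs generalizing s with
  | nil => rfl
  | cons y xs ih =>
    by_cases hy : y = v
    · rw [List.filter_cons, if_neg (by simp [hy]), List.foldl_cons, hy, PySem.Set.add_of_mem h]
      exact ih s h
    · simp only [List.filter_cons, bne_iff_ne, if_pos hy, List.foldl_cons]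
      refine ih _ ?_
      rcases Classical.em (y ∈ s) with hys | hys
      · rw [PySem.Set.add_of_mem hys]; exact h
      · rw [PySem.Set.add_of_not_mem hys]; exact List.mem_append_left _ h

lemma dedup_cons (v : String) (xs : List String) :
    PySem.List.dedup (v :: xs) = v :: PySem.List.dedup (xs.filter (fun x => x != v)) := by
  rw [PySem.List.dedup_eq_ofList, PySem.List.dedup_eq_ofList,
      PySem.Set.ofList_eq_foldl, PySem.Set.ofList_eq_foldl]
  simp only [List.foldl_cons]
  have h0 : PySem.Set.add [] v = [v] := rfl
  rw [h0, foldl_add_filter_mem xs [v] v (by simp)]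
  exact foldl_add_cons _ [] v (fun y hy => by simpa using (List.of_mem_filter hy))

lemma collapse_cons (e : List (String × String)) (rest : List (List (String × String))) :
    pvCollapse (e :: rest)
      = PySem.List.pyGetD ((e :: rest).filter (fun x => pvVerbA x == pvVerbA e)) (-1) []
          :: pvCollapse (rest.filter (fun x => pvVerbA x != pvVerbA e)) := by
  rw [pvCollapse]

lemma collapse_spec_aux (n : Nat) : ∀ l : List (List (String × String)), l.length ≤ n →
    pvCollapse l = pvSpecList l := by
  induction n with
  | zero =>
    intro l hl
    rw [List.length_eq_zero_iff.mp (Nat.le_zero.mp hl)]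
    rw [pvCollapse]; rfl
  | succ n ih =>
    intro l hl
    match l with
    | [] => rw [pvCollapse]; rfl
    | e :: rest =>
      set v := pvVerbA e with hv
      rw [collapse_cons, pvSpecList]
      have hmap : (e :: rest).map pvVerbA = v :: rest.map pvVerbA := by simp [hv]
      rw [hmap, dedup_cons, List.map_cons]
      congr 1
      · have hsame : (e :: rest).filter (fun x => pvVerbA x == v)
            = e :: rest.filter (fun x => pvVerbA x == v) := by
          simp [List.filter_cons, hv]
        rw [hsame, pyGetD_neg_one, ← hsame]
      · have hlen : (rest.filter (fun x => pvVerbA x != v)).length ≤ n := by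
          have := List.length_filter_le (fun x => pvVerbA x != v) rest
          simp only [List.length_cons] at hl
          omega
        rw [ih _ hlen, pvSpecList]
        have hfm : (rest.map pvVerbA).filter (fun x => x != v)
            = (rest.filter (fun x => pvVerbA x != v)).map pvVerbA := by
          exact (map_filter_comm pvVerbA (fun x => x != v) rest).symm
        rw [hfm]
        refine List.map_congr_left (fun k hk => ?_)
        have hkne : k ≠ v := by
          rcases List.mem_map.mp ((PySem.List.mem_dedup _ _).mp hk) with ⟨x, hx, hxk⟩
          have := List.of_mem_filter hx
          simpa [hxk] using this
        have hfe : (e :: rest).filter (fun x => pvVerbA x == k)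
            = (rest.filter (fun x => pvVerbA x != v)).filter (fun x => pvVerbA x == k) := by
          rw [List.filter_cons, if_neg (by simp [← hv]; exact fun h => hkne h.symm),
              List.filter_filter]
          refine (List.filter_congr (fun x _ => ?_)).symm
          by_cases hx : pvVerbA x = k
          · simp [hx, hkne]
          · simp [hx]
        rw [hfe]

lemma collapse_spec (l : List (List (String × String))) : pvCollapse l = pvSpecList l :=
  collapse_spec_aux l.length l (Nat.le_refl _)

-- ===== A's side: the previous characterisation, A = values of the final dict =====

-- A's seen/ordered loop carries the same list twice: the ordered list and the seen set coincide.
lemma seen_loop_eq (l : List (List (String × String))) (s : PySem.Set String) :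
    l.foldl (fun p e =>
      let v := pvVerbA e
      if PySem.Set.contains p.2 v then p else (p.1 ++ [v], PySem.Set.add p.2 v)) (s, s)
    = (l.foldl (fun t e => PySem.Set.add t (pvVerbA e)) s,
       l.foldl (fun t e => PySem.Set.add t (pvVerbA e)) s) := by
  induction l generalizing s with
  | nil => rfl
  | cons e l ih =>
    simp only [List.foldl_cons]
    by_cases h : pvVerbA e ∈ s
    · rw [PySem.Set.add_of_mem h]
      simpa [h, PySem.Set.contains_iff] using ih s
    · rw [PySem.Set.add_of_not_mem h]
      simpa [h, PySem.Set.contains_iff, PySem.Set.add_of_not_mem h] using ih (s ++ [pvVerbA e])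

-- keys-filter-getD of a dict with unique keys is its values list.
lemma filter_map_values (d : PySem.Dict String (List (String × String))) (h : d.keys.Nodup) :
    ((d.keys.filter (fun v => d.contains v)).map (fun v => d.getD v [])) = d.values := by
  have hf : d.keys.filter (fun v => d.contains v) = d.keys := by
    apply List.filter_eq_self.mpr
    intro k hk
    exact (PySem.Dict.contains_iff_mem_keys d k).mpr hk
  rw [hf, ← PySem.Dict.values_eq_map_keys d h]

-- last step shared by the two case analyses: the ordered verb list equals the final dict's keys.
lemma final_step (d0 : PySem.Dict String (List (String × String)))
    (new_entry : List (String × String)) (nv : String) (overwrite : Bool)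
    (hnd0 : d0.keys.Nodup) :
    (((if PySem.Set.contains d0.keys nv then d0.keys else d0.keys ++ [nv]).filter
        (fun v => (if overwrite || !(d0.contains nv) then d0.insert nv new_entry else d0).contains v)).map
        (fun v => (if overwrite || !(d0.contains nv) then d0.insert nv new_entry else d0).getD v []))
    = (if overwrite || !(d0.contains nv) then d0.insert nv new_entry else d0).values := by
  by_cases hmem : nv ∈ d0.keys
  · have hc : d0.contains nv = true := (PySem.Dict.contains_iff_mem_keys d0 nv).mpr hmem
    have hcs : PySem.Set.contains d0.keys nv = true := (PySem.Set.contains_iff d0.keys nv).mpr hmem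
    rw [hcs, if_pos rfl]
    cases overwrite with
    | false =>
      simp only [hc, Bool.not_true, Bool.or_false]
      rw [if_neg (by simp)]
      exact filter_map_values d0 hnd0
    | true =>
      simp only [Bool.true_or, if_true]
      have hk : (d0.insert nv new_entry).keys = d0.keys :=
        PySem.Dict.keys_insert_of_contains d0 new_entry hc
      rw [← hk]
      exact filter_map_values (d0.insert nv new_entry) (hk ▸ hnd0)
  · have hc : d0.contains nv = false := by
      rw [PySem.Dict.contains_eq_decide_mem_keys]; simp [hmem]
    have hcs : PySem.Set.contains d0.keys nv = false := by
      simp only [PySem.Set.contains_eq_listContains]; simp [hmem]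
    rw [hcs]
    simp only [hc, Bool.not_false, Bool.or_true]
    rw [if_neg (show ¬(false = true) by simp)]
    simp only [if_true]
    have hk : (d0.insert nv new_entry).keys = d0.keys ++ [nv] :=
      PySem.Dict.keys_insert_of_not_contains d0 new_entry hc
    have hnd : (d0.insert nv new_entry).keys.Nodup := by
      rw [hk]
      rw [List.nodup_append]
      refine ⟨hnd0, List.nodup_singleton nv, ?_⟩
      intro a ha b hb
      simp only [List.mem_singleton] at hb
      subst hb
      exact fun he => hmem (he ▸ ha)
    rw [← hk]
    exact filter_map_values (d0.insert nv new_entry) hnd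

lemma nodup_keys_pvD (l : List (List (String × String))) : (pvD l).keys.Nodup :=
  PySem.Dict.nodup_keys_foldl_insert_key _ _ _ _ PySem.Dict.nodup_keys_empty

lemma a_eq_values (existing_entries : List (List (String × String)))
    (new_entry : List (String × String)) (overwrite : Bool) :
    merge_entry existing_entries new_entry overwrite
      = (if overwrite || !((pvD existing_entries).contains (pvVerbA new_entry)) then
           (pvD existing_entries).insert (pvVerbA new_entry) new_entry
         else pvD existing_entries).values := by
  unfold merge_entry
  rw [seen_loop_eq existing_entries []]
  have hfold : existing_entries.foldl (fun t e => PySem.Set.add t (pvVerbA e)) ([] : PySem.Set String)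
      = (pvD existing_entries).keys := by
    rw [pvD, PySem.Dict.keys_foldl_insert_key, PySem.Dict.keys_empty,
        ← PySem.Set.update_map_eq_foldl_add]
  simp only [hfold]
  exact final_step _ new_entry (pvVerbA new_entry) overwrite (nodup_keys_pvD _)

lemma cond_eq (existing_entries : List (List (String × String))) (nv : String) :
    existing_entries.all (fun e => pvVerbA e != nv)
      = !((pvD existing_entries).contains nv) := by
  rw [PySem.Dict.contains_eq_decide_mem_keys, keys_pvD]
  by_cases h : nv ∈ existing_entries.map pvVerbA
  · simp [h]
    rcases List.mem_map.mp h with ⟨x, hx, hxk⟩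
    exact ⟨x, hx, hxk⟩
  · simp [h]
    intro x hx hxk
    exact h (List.mem_map.mpr ⟨x, hx, hxk⟩)

-- ===== VERDICT (by name: the statement is the Claim_ definition above) =====
theorem merge_entry_spec : Claim_equal_merge_entry := by
  intro existing_entries new_entry overwrite _ _
  unfold Spec_merge_entry merge_entry_alt
  rw [a_eq_values]
  simp only [cond_eq existing_entries (pvVerbA new_entry)]
  have happ : pvD (existing_entries ++ [new_entry])
      = (pvD existing_entries).insert (pvVerbA new_entry) new_entry := by
    rw [pvD, pvD, List.foldl_append]; rfl
  by_cases hc : (overwrite || !((pvD existing_entries).contains (pvVerbA new_entry))) = true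
  · rw [if_pos hc, if_pos hc, collapse_spec, ← values_fold, happ]
  · rw [if_neg hc, if_neg hc, collapse_spec, ← values_fold]
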